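-- pv_equiv track=rewrite | github.com/DohyeonY/Today-I-Learned | daily/230715/명예의전당.py | solution
-- ===== SOURCE A (Python) =====
-- def solution(k, score):
--     answer = []
--
--     for i in range(len(score)) :
--         rank = sorted(score[0 : i + 1], reverse = True)
--
--         if i >= k :
--             answer.append(rank[k-1])
--
--         else:
--             answer.append(min(rank))
--
--     return answer
-- ===== SOURCE B (Python) =====
-- def solution(k, score):
--     # Maintain `top`: an ascending list of the (at most) k largest scores seen
--     # so far.  Each step: insert the new score in order, drop the smallest when
--     # the list exceeds k, and report top[0] (the k-th largest so far, or the
--     # minimum while fewer than k scores have been seen).  One incremental list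
--     # instead of re-sorting every prefix.
--     answer = []
--     top = []
--     for s in score:
--         j = len(top)
--         while j > 0 and top[j - 1] > s:
--             j -= 1
--         top.insert(j, s)
--         if len(top) > k:
--             top.pop(0)
--         answer.append(top[0])
--     return answer
-- ===== Notes on version B (the rewrite author's own statement) =====
-- stated objective: alternative
-- what changed: Instead of re-sorting every prefix, B maintains one incrementally sorted list of the at-most-k largest scores seen so far (ordered insert + drop-min) and reads its head each step.
-- outside the precondition, e.g. on solution(0, [1, 2]): A returns [1, 1], B raises IndexError
import Mathlib
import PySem

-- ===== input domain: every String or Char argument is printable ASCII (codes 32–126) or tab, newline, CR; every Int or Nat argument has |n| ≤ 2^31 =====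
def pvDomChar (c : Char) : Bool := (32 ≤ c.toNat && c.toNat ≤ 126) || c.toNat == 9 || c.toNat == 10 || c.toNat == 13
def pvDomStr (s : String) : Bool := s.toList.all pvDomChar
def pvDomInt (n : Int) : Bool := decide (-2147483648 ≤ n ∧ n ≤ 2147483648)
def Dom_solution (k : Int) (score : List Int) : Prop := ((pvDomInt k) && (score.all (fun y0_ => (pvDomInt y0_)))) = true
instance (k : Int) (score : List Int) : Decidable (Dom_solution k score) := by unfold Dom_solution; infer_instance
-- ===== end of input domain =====

-- B keeps one incrementally sorted top-k list (insert + drop-min) instead of re-sorting every prefix.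

-- ===== PORT A =====
def solution (k : Int) (score : List Int) : List Int :=
  (PySem.List.pyRange 0 (score.length : Int) 1).foldl (fun answer i =>
    let rank := PySem.List.sorted (PySem.List.slice score (some 0) (some (i + 1))) (fun x => x) true
    if k ≤ i then
      answer ++ [(PySem.List.pyGet? rank (k - 1)).getD 0]
    else
      answer ++ [(PySem.List.min? rank (fun x => x)).getD 0]) []

-- ===== PORT B =====
-- ordered insert: the while-loop of Source B finds the insertion point in the
-- ascending list `top`; this recursion inserts at the same position.
def insertAsc (s : Int) : List Int → List Int
  | [] => [s]
  | x :: xs => if s < x then s :: x :: xs else x :: insertAsc s xs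

def solution_alt (k : Int) (score : List Int) : List Int :=
  (score.foldl (fun (st : List Int × List Int) s =>
      let top0 := insertAsc s st.2
      let top := if k < (top0.length : Int) then top0.tail else top0
      (st.1 ++ [top.headD 0], top))
    ([], [])).1

-- ===== PRECONDITION & SPEC =====
-- Pre_ excludes nonpositive k on nonempty input: for k < 0 A raises IndexError, and
-- for k = 0 A's rank[k-1] wraps to rank[-1] (the running minimum) by accident of
-- Python's negative indexing — B's top-k list is empty there and raises IndexError.
def Pre_solution (k : Int) (score : List Int) : Prop := 1 ≤ k ∨ score = []
instance (k : Int) (score : List Int) : Decidable (Pre_solution k score) := by unfold Pre_solution; infer_instance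
def pvWitness_solution : Int × List Int := (2, [5, 3, 8, 3])

def Spec_solution (k : Int) (score : List Int) (out : List Int) : Prop := out = solution_alt k score
instance (k : Int) (score : List Int) (out : List Int) : Decidable (Spec_solution k score out) := by unfold Spec_solution; infer_instance

-- ===== CLAIM (what is proved, stated in full; the proofs are below) =====
def Claim_equal_solution : Prop := ∀ (k : Int) (score : List Int), Dom_solution k score → Pre_solution k score → Spec_solution k score (solution k score)

-- ===== LEMMAS AND PROOFS =====

-- the ascending sort of a prefix, and the value both programs report for it
def sortAsc (p : List Int) : List Int := PySem.List.sorted p (fun x => x) false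

def valAt (k : Int) (p : List Int) : Int :=
  ((sortAsc p).drop (p.length - k.toNat)).headD 0

theorem insertAsc_perm (s : Int) (l : List Int) : (insertAsc s l).Perm (s :: l) := by
  induction l with
  | nil => simp [insertAsc]
  | cons x xs ih =>
    simp only [insertAsc]
    split
    · exact List.Perm.refl _
    · exact (List.Perm.cons x ih).trans (List.Perm.swap s x xs)

theorem insertAsc_length (s : Int) (l : List Int) : (insertAsc s l).length = l.length + 1 := by
  simpa using (insertAsc_perm s l).length_eq

theorem insertAsc_pairwise (s : Int) (l : List Int) (h : l.Pairwise (· ≤ ·)) :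
    (insertAsc s l).Pairwise (· ≤ ·) := by
  induction l with
  | nil => simp [insertAsc]
  | cons x xs ih =>
    rcases List.pairwise_cons.mp h with ⟨hx, hxs⟩
    simp only [insertAsc]
    split
    · rename_i hs
      refine List.pairwise_cons.mpr ⟨?_, h⟩
      intro y hy
      rcases List.mem_cons.mp hy with rfl | hy'
      · exact le_of_lt hs
      · exact le_trans (le_of_lt hs) (hx _ hy')
    · rename_i hs
      refine List.pairwise_cons.mpr ⟨?_, ih hxs⟩
      intro y hy
      rcases List.mem_cons.mp ((insertAsc_perm s xs).mem_iff.mp hy) with rfl | hy'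
      · exact le_of_not_gt hs
      · exact hx _ hy'

theorem sortAsc_pairwise (p : List Int) : (sortAsc p).Pairwise (· ≤ ·) := by
  simpa using PySem.List.sorted_pairwise p (fun x => x)

theorem sortAsc_length (p : List Int) : (sortAsc p).length = p.length :=
  PySem.List.length_sorted p (fun x => x) false

theorem insertAsc_sortAsc (s : Int) (p : List Int) :
    insertAsc s (sortAsc p) = sortAsc (p ++ [s]) := by
  have hperm : (insertAsc s (sortAsc p)).Perm (p ++ [s]) := by
    refine ((insertAsc_perm s (sortAsc p)).trans ?_)
    refine List.Perm.trans ?_ (List.perm_append_singleton s p).symm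
    exact List.Perm.cons s (PySem.List.sorted_perm p (fun x => x) false)
  exact (PySem.List.sorted_id_eq_of_perm_of_pairwise (p ++ [s]) _ hperm
    (insertAsc_pairwise s _ (sortAsc_pairwise p))).symm

-- popping the minimum after inserting into a suffix = dropping one more of the full insert
theorem insertAsc_drop_tail (s : Int) (l : List Int) (hl : l.Pairwise (· ≤ ·)) :
    ∀ d : Nat, d ≤ l.length →
      (insertAsc s (l.drop d)).tail = (insertAsc s l).drop (d + 1) := by
  induction l with
  | nil =>
    intro d hd
    have : d = 0 := by simpa using hd
    subst this
    simp [insertAsc]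
  | cons x xs ih =>
    intro d hd
    match d with
    | 0 => simp [List.tail]
    | Nat.succ d =>
      rcases List.pairwise_cons.mp hl with ⟨hx, hxs⟩
      have ih' := ih hxs d (by simpa using hd)
      simp only [List.drop_succ_cons, insertAsc]
      split
      · rename_i hs
        -- s < x ≤ every element of xs, so insertAsc puts s in front of xs too
        have hfront : insertAsc s xs = s :: xs := by
          cases xs with
          | nil => simp [insertAsc]
          | cons y ys =>
            have : s < y := lt_of_lt_of_le hs (hx y (by simp))
            simp [insertAsc, this]
        rw [ih', hfront]
        simp
      · simpa using ih'

theorem sortAsc_nil : sortAsc [] = [] := rfl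

theorem step_top (k : Int) (hk : 1 ≤ k) (p : List Int) (s : Int) :
    (if k < ((insertAsc s ((sortAsc p).drop (p.length - k.toNat))).length : Int)
      then (insertAsc s ((sortAsc p).drop (p.length - k.toNat))).tail
      else insertAsc s ((sortAsc p).drop (p.length - k.toNat)))
    = (sortAsc (p ++ [s])).drop (p.length + 1 - k.toNat) := by
  have hlenS := sortAsc_length p
  have hlen : (insertAsc s ((sortAsc p).drop (p.length - k.toNat))).length
      = ((sortAsc p).drop (p.length - k.toNat)).length + 1 := insertAsc_length _ _
  have ht : 1 ≤ k.toNat := by omega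
  by_cases hm : k.toNat ≤ p.length
  · have hcond : k < ((insertAsc s ((sortAsc p).drop (p.length - k.toNat))).length : Int) := by
      rw [hlen]
      simp only [List.length_drop, hlenS]
      omega
    rw [if_pos hcond]
    rw [insertAsc_drop_tail s (sortAsc p) (sortAsc_pairwise p) (p.length - k.toNat) (by omega)]
    rw [insertAsc_sortAsc]
    congr 1
    omega
  · have hd : p.length - k.toNat = 0 := by omega
    have hcond : ¬ k < ((insertAsc s ((sortAsc p).drop (p.length - k.toNat))).length : Int) := by
      rw [hlen]
      simp only [List.length_drop, hlenS]
      omega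
    rw [if_neg hcond, hd]
    simp only [List.drop_zero]
    rw [insertAsc_sortAsc]
    have h0 : p.length + 1 - k.toNat = 0 := by omega
    rw [h0, List.drop_zero]

theorem alt_go (k : Int) (hk : 1 ≤ k) (rest : List Int) : ∀ (ans p : List Int),
    (rest.foldl (fun (st : List Int × List Int) s =>
        let top0 := insertAsc s st.2
        let top := if k < (top0.length : Int) then top0.tail else top0
        (st.1 ++ [top.headD 0], top))
      (ans, (sortAsc p).drop (p.length - k.toNat))).1
    = ans ++ (List.range rest.length).map (fun j => valAt k (p ++ rest.take (j + 1))) := by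
  induction rest with
  | nil => intro ans p; simp
  | cons s rest ih =>
    intro ans p
    simp only [List.foldl_cons]
    have hstep := step_top k hk p s
    have hval : valAt k (p ++ [s])
        = ((sortAsc (p ++ [s])).drop (p.length + 1 - k.toNat)).headD 0 := by
      simp [valAt]
    rw [show ((sortAsc (p ++ [s])).drop (p.length + 1 - k.toNat))
        = (sortAsc (p ++ [s])).drop ((p ++ [s]).length - k.toNat) by simp] at hstep
    rw [hstep]
    have := ih (ans ++ [((sortAsc (p ++ [s])).drop ((p ++ [s]).length - k.toNat)).headD 0]) (p ++ [s])
    rw [this]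
    rw [List.append_assoc]
    congr 1
    rw [List.length_cons, List.range_succ_eq_map, List.map_cons, List.map_map]
    simp only [List.singleton_append, List.cons.injEq]
    refine ⟨by simp [valAt], ?_⟩
    apply List.map_congr_left
    intro j hj
    simp [Function.comp, List.append_assoc]

theorem alt_eq (k : Int) (hk : 1 ≤ k) (score : List Int) :
    solution_alt k score
      = (List.range score.length).map (fun j => valAt k (score.take (j + 1))) := by
  have := alt_go k hk score [] []
  simpa [solution_alt, sortAsc_nil] using this

-- A's per-index value equals valAt
theorem desc_eq_reverse (p : List Int) :
    PySem.List.sorted p (fun x => x) true = (sortAsc p).reverse := by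
  refine List.Perm.eq_of_pairwise (le := fun a b : Int => b ≤ a)
    (fun a b _ _ h1 h2 => le_antisymm h2 h1) ?_ ?_ ?_
  · simpa using PySem.List.sorted_pairwise_rev p (fun x => x)
  · rw [List.pairwise_reverse]
    simpa using sortAsc_pairwise p
  · exact (PySem.List.sorted_perm p (fun x => x) true).trans
      ((PySem.List.sorted_perm p (fun x => x) false).symm.trans (List.reverse_perm _).symm)

theorem pointwise (k : Int) (hk : 1 ≤ k) (score : List Int) (j : Nat) (hj : j < score.length) :
    (if k ≤ ((j : Nat) : Int) then
        (PySem.List.pyGet? (PySem.List.sorted (PySem.List.slice score (some 0) (some ((j : Int) + 1))) (fun x => x) true) (k - 1)).getD 0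
      else
        (PySem.List.min? (PySem.List.sorted (PySem.List.slice score (some 0) (some ((j : Int) + 1))) (fun x => x) true) (fun x => x)).getD 0)
    = valAt k (score.take (j + 1)) := by
  have hslice : PySem.List.slice score (some 0) (some ((j : Int) + 1)) = score.take (j + 1) := by
    rw [PySem.List.slice_zero_start]
    have h1 : ((j : Int) + 1) = ((j + 1 : Nat) : Int) := by push_cast; ring
    rw [h1, PySem.List.slice_to_natCast]
  rw [hslice, desc_eq_reverse]
  set p := score.take (j + 1) with hp
  have hplen : p.length = j + 1 := by
    rw [hp, List.length_take]; omega
  have hlenS : (sortAsc p).length = p.length := sortAsc_length p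
  set t := k.toNat with htdef
  have ht : 1 ≤ t := by omega
  by_cases hcase : k ≤ ((j : Nat) : Int)
  · have htj : t ≤ j := by omega
    rw [if_pos hcase]
    have hk1 : k - 1 = ((t - 1 : Nat) : Int) := by omega
    rw [hk1, PySem.List.pyGet?_natCast]
    have hlt : t - 1 < (sortAsc p).length := by
      rw [hlenS, hplen]; omega
    rw [List.getElem?_reverse hlt]
    unfold valAt
    rw [List.headD_eq_head?, List.head?_drop]
    congr 2
    rw [hlenS, hplen]
    omega
  · rw [if_neg hcase]
    have htj : j + 1 ≤ t := by omega
    unfold valAt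
    rw [hplen]
    have hd0 : j + 1 - t = 0 := by omega
    rw [hd0, List.drop_zero]
    -- rank is nonempty; its min is the head of the ascending sort
    obtain ⟨a, tl, hcons⟩ : ∃ a tl, sortAsc p = a :: tl := by
      cases hsa : sortAsc p with
      | nil =>
        exfalso
        rw [hsa] at hlenS
        rw [hplen] at hlenS
        simp at hlenS
      | cons a tl => exact ⟨a, tl, rfl⟩
    have hhead : ∀ y ∈ p, a ≤ y := PySem.List.key_head_sorted_le p (fun x => x) hcons
    cases hmin : PySem.List.min? (sortAsc p).reverse (fun x => x) with
    | none =>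
      exfalso
      have hnil := (PySem.List.min?_eq_none_iff (sortAsc p).reverse (fun x => x)).mp hmin
      rw [hcons] at hnil
      simp at hnil
    | some v =>
      have hv_mem : v ∈ p := by
        have hvm : v ∈ sortAsc p := by simpa using PySem.List.min?_mem hmin
        exact ((PySem.List.sorted_perm p (fun x => x) false).mem_iff).mp hvm
      have hav : a ≤ v := hhead v hv_mem
      have hva : v ≤ a := by
        have := PySem.List.min?_isMin hmin a (by rw [hcons]; simp)
        simpa using this
      rw [hcons]
      simpa using le_antisymm hva hav

theorem a_eq (k : Int) (hk : 1 ≤ k) (score : List Int) :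
    solution k score
      = (List.range score.length).map (fun j => valAt k (score.take (j + 1))) := by
  have hfun : (fun (answer : List Int) (i : Int) =>
        let rank := PySem.List.sorted (PySem.List.slice score (some 0) (some (i + 1))) (fun x => x) true
        if k ≤ i then
          answer ++ [(PySem.List.pyGet? rank (k - 1)).getD 0]
        else
          answer ++ [(PySem.List.min? rank (fun x => x)).getD 0])
      = (fun (answer : List Int) (i : Int) => answer ++
          [if k ≤ i then
            (PySem.List.pyGet? (PySem.List.sorted (PySem.List.slice score (some 0) (some (i + 1))) (fun x => x) true) (k - 1)).getD 0
          else
            (PySem.List.min? (PySem.List.sorted (PySem.List.slice score (some 0) (some (i + 1))) (fun x => x) true) (fun x => x)).getD 0]) := by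
    funext answer i
    by_cases h : k ≤ i <;> simp [h]
  unfold solution
  rw [hfun, PySem.List.foldl_append_singleton_eq_map]
  rw [PySem.List.pyRange_zero_natCast]
  rw [List.map_map]
  simp only [List.nil_append]
  apply List.map_congr_left
  intro j hj
  have hj' : j < score.length := List.mem_range.mp hj
  simpa [Function.comp] using pointwise k hk score j hj'

-- ===== VERDICT (by name: the statement is the Claim_ definition above) =====
theorem solution_spec : Claim_equal_solution := by
  intro k score _ hpre
  unfold Spec_solution
  rcases hpre with hk | hnil
  · rw [a_eq k hk score, alt_eq k hk score]
  · subst hnil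
    rfl
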